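-- pv_equiv track=rewrite | github.com/svilupp/textprompts | src/textprompts/sections.py | _normalize_anchor_id
-- ===== SOURCE A (Python) =====
-- def _normalize_anchor_id(value: str) -> str:
--     out: list[str] = []
--     last_was_underscore = False
--     for char in value.lower():
--         if char.isascii() and char.isalnum():
--             out.append(char)
--             last_was_underscore = False
--         elif out and not last_was_underscore:
--             out.append("_")
--             last_was_underscore = True
--
--     while out and out[-1] == "_":
--         out.pop()
--
--     normalized = "".join(out)
--     return normalized or "section"
-- ===== SOURCE B (Python) =====
-- def _normalize_anchor_id(value: str) -> str:
--     cleaned = "".join(c if c.isascii() and c.isalnum() else " " for c in value.lower())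
--     return "_".join(cleaned.split()) or "section"
-- ===== Notes on version B (the rewrite author's own statement) =====
-- stated objective: idiomatic
-- what changed: Replaces the char-by-char state machine (last_was_underscore flag plus trailing-underscore pop loop) with a two-step pipeline: map every non-ASCII-alphanumeric char of the lowered string to a space, then str.split() and join the words with underscores, which collapses runs and strips both ends in one idiom.
import Mathlib
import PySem

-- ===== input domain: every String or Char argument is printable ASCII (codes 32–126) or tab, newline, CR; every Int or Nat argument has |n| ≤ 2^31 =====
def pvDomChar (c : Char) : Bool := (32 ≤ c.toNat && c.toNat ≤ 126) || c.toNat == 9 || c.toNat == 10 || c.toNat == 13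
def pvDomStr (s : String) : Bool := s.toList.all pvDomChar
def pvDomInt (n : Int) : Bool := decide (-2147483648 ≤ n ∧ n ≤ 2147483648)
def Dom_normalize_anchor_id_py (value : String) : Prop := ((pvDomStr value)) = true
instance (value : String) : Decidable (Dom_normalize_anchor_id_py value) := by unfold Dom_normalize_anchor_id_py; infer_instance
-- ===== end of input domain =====

-- B replaces A's char-by-char state machine (last_was_underscore flag + trailing-pop loop)
-- by the idiomatic pipeline: map each separator char to a space, split into words, join the
-- words with underscores; same O(n) cost, return values proved equal for every string.

-- ===== PORT A =====
-- `char.isascii() and char.isalnum()` — the per-char test both Python versions contain verbatim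
def pvAsciiAlnum (c : Char) : Bool := decide (c.toNat ≤ 127) && PySem.Chars.isalnum c

-- the `while out and out[-1] == "_": out.pop()` loop
def pvPopTrailing (out : List Char) : List Char :=
  if h : out.getLast? = some '_' then pvPopTrailing out.dropLast else out
termination_by out.length
decreasing_by
  cases out with
  | nil => simp at h
  | cons a l => simp [List.length_dropLast]

def normalize_anchor_id_py (value : String) : String :=
  let st := (PySem.Str.lower value).toList.foldl
    (fun (st : List Char × Bool) char =>
      if pvAsciiAlnum char then (st.1 ++ [char], false)
      else if !st.1.isEmpty && !st.2 then (st.1 ++ ['_'], true)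
      else st) ([], false)
  let normalized := String.ofList (pvPopTrailing st.1)
  if normalized = "" then "section" else normalized

-- ===== PORT B =====
def normalize_anchor_id_py_alt (value : String) : String :=
  let cleaned := String.ofList ((PySem.Str.lower value).toList.map
    (fun c => if pvAsciiAlnum c then c else ' '))
  let joined := PySem.Str.join "_" (PySem.Str.split₀ cleaned)
  if joined = "" then "section" else joined

-- ===== PRECONDITION & SPEC =====
def Spec_normalize_anchor_id_py (value : String) (out : String) : Prop := out = normalize_anchor_id_py_alt value
instance (value : String) (out : String) : Decidable (Spec_normalize_anchor_id_py value out) := by unfold Spec_normalize_anchor_id_py; infer_instance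

-- ===== CLAIM (what is proved, stated in full; the proofs are below) =====
def Claim_equal_normalize_anchor_id_py : Prop := ∀ (value : String), Dom_normalize_anchor_id_py value → Spec_normalize_anchor_id_py value (normalize_anchor_id_py value)

-- ===== LEMMAS AND PROOFS =====

def pvWords (cs : List Char) : List (List Char) :=
  match cs with
  | [] => []
  | c :: rest =>
    if pvAsciiAlnum c then
      (c :: rest.takeWhile pvAsciiAlnum) :: pvWords (rest.dropWhile pvAsciiAlnum)
    else pvWords rest
termination_by cs.length
decreasing_by
  · have := List.length_dropWhile_le pvAsciiAlnum rest; simp; omega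
  · simp

def pvF : Bool → List Char → List Char
  | _, [] => []
  | flag, c :: cs =>
    if pvAsciiAlnum c then c :: pvF false cs
    else if flag then pvF true cs else '_' :: pvF true cs

def pvLead (cs : List Char) : List Char :=
  match cs with | [] => [] | c :: _ => if pvAsciiAlnum c then [] else ['_']

def pvTrailAux : Option Char → Bool → List Char
  | some c, a => if a && !pvAsciiAlnum c then ['_'] else []
  | none, _ => []

def pvTrail (cs : List Char) : List Char := pvTrailAux cs.getLast? (cs.any pvAsciiAlnum)

def pvWordsCont : List Char → List Char → List (List Char)
  | [], cur => if cur.isEmpty then [] else [cur.reverse]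
  | c :: rest, cur =>
    if pvAsciiAlnum c then pvWordsCont rest (c :: cur)
    else (if cur.isEmpty then [] else [cur.reverse]) ++ pvWordsCont rest []

theorem pvF_true (cs : List Char) :
    pvF true cs = pvF false (cs.dropWhile (fun c => !pvAsciiAlnum c)) := by
  induction cs with
  | nil => rfl
  | cons c cs ih => by_cases hc : pvAsciiAlnum c = true <;> simp [pvF, hc, ih]

theorem pvWords_dropBad (cs : List Char) :
    pvWords (cs.dropWhile (fun c => !pvAsciiAlnum c)) = pvWords cs := by
  induction cs with
  | nil => rfl
  | cons c cs ih => by_cases hc : pvAsciiAlnum c = true <;> simp [hc, pvWords, ih]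

theorem pvWords_nil_iff (cs : List Char) :
    pvWords cs = [] ↔ cs.any pvAsciiAlnum = false := by
  induction cs with
  | nil => simp [pvWords]
  | cons c cs ih => by_cases hc : pvAsciiAlnum c = true <;> simp [pvWords, hc, ih]

theorem pvLead_dropBad (cs : List Char) :
    pvLead (cs.dropWhile (fun c => !pvAsciiAlnum c)) = [] := by
  induction cs with
  | nil => rfl
  | cons c cs ih =>
    by_cases hc : pvAsciiAlnum c = true
    · simp [hc, pvLead]
    · rw [List.dropWhile_cons, if_pos (by simp [hc])]; exact ih

theorem pvTrail_cons_of_any (c : Char) (rest : List Char) (h1 : rest ≠ [])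
    (h2 : rest.any pvAsciiAlnum = true) : pvTrail (c :: rest) = pvTrail rest := by
  obtain ⟨d, rest', rfl⟩ := List.exists_cons_of_ne_nil h1
  have h3 : (c :: d :: rest').any pvAsciiAlnum = true := by
    rw [List.any_cons, h2]; simp
  unfold pvTrail
  rw [List.getLast?_cons_cons, h2, h3]

theorem pvAllBad_last (rest : List Char) (h : rest.any pvAsciiAlnum = false)
    (x : Char) (hx : rest.getLast? = some x) : pvAsciiAlnum x = false := by
  have hm : x ∈ rest := List.mem_of_getLast? hx
  simp [List.any_eq_false] at h
  exact h x hm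

theorem pvDropWhile_head_good : ∀ (l : List Char) (e : Char) (d' : List Char),
    l.dropWhile (fun c => !pvAsciiAlnum c) = e :: d' → pvAsciiAlnum e = true := by
  intro l
  induction l with
  | nil => intro e d' h; simp at h
  | cons a l ih =>
    intro e d' h
    by_cases ha : pvAsciiAlnum a = true
    · rw [List.dropWhile_cons, if_neg (by simp [ha])] at h
      cases h; exact ha
    · rw [List.dropWhile_cons, if_pos (by simp [ha])] at h
      exact ih e d' h

theorem pvA2 (cs : List Char) :
    pvF false cs = pvLead cs ++ List.intercalate ['_'] (pvWords cs) ++ pvTrail cs := by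
  induction hn : cs.length using Nat.strong_induction_on generalizing cs with
  | _ n ih =>
  cases cs with
  | nil => simp [pvF, pvWords, pvLead, pvTrail, pvTrailAux, List.intercalate]
  | cons c rest =>
    subst hn
    by_cases hc : pvAsciiAlnum c = true
    · -- good head
      have ihr := ih rest.length (by simp) rest rfl
      rw [pvF, if_pos hc]
      rw [pvWords, if_pos hc]
      cases hrest : rest with
      | nil => simp [pvF, pvWords, pvLead, pvTrail, pvTrailAux, hc, List.intercalate]
      | cons d rest' =>
        subst hrest
        by_cases hd : pvAsciiAlnum d = true
        · -- good, good
          have hwords : pvWords (d :: rest') = (d :: rest'.takeWhile pvAsciiAlnum) :: pvWords (rest'.dropWhile pvAsciiAlnum) := by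
            rw [pvWords, if_pos hd]
          rw [List.takeWhile_cons, if_pos hd, List.dropWhile_cons, if_pos hd]
          have hlead : pvLead (d :: rest') = [] := by simp [pvLead, hd]
          have htr : pvTrail (c :: d :: rest') = pvTrail (d :: rest') := by
            apply pvTrail_cons_of_any _ _ (by simp) (by simp [hd])
          rw [hwords, hlead] at ihr
          have hint : List.intercalate ['_'] ((c :: d :: rest'.takeWhile pvAsciiAlnum) :: pvWords (rest'.dropWhile pvAsciiAlnum))
              = c :: List.intercalate ['_'] ((d :: rest'.takeWhile pvAsciiAlnum) :: pvWords (rest'.dropWhile pvAsciiAlnum)) := by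
            cases pvWords (rest'.dropWhile pvAsciiAlnum) <;> simp [List.intercalate, List.intersperse]
          rw [htr, hint, ihr]
          simp [pvLead, hc]
        · -- good, bad
          rw [List.takeWhile_cons, if_neg (by simp [hd]), List.dropWhile_cons, if_neg (by simp [hd])]
          have hlead : pvLead (d :: rest') = ['_'] := by simp [pvLead, hd]
          rw [hlead] at ihr
          cases hw : pvWords (d :: rest') with
          | nil =>
            have hany : (d :: rest').any pvAsciiAlnum = false := (pvWords_nil_iff _).1 hw
            have hnn : (d :: rest').getLast? ≠ none := by simp
            obtain ⟨x, hx⟩ := Option.ne_none_iff_exists'.1 hnn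
            have hlast := pvAllBad_last _ hany x hx
            have htrr : pvTrail (d :: rest') = [] := by
              unfold pvTrail; rw [hx, hany]; rfl
            have htrc : pvTrail (c :: d :: rest') = ['_'] := by
              have ha : (c :: d :: rest').any pvAsciiAlnum = true := by
                rw [List.any_cons, hc]; simp
              unfold pvTrail
              rw [List.getLast?_cons_cons, hx, ha]
              simp [pvTrailAux, hlast]
            rw [hw] at ihr
            rw [htrr] at ihr
            rw [htrc, ihr]
            simp [pvLead, hc, List.intercalate, List.intersperse]
          | cons w W =>
            have hany : (d :: rest').any pvAsciiAlnum = true := by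
              by_contra h
              simp only [Bool.not_eq_true] at h
              rw [(pvWords_nil_iff _).2 h] at hw
              simp at hw
            have htr : pvTrail (c :: d :: rest') = pvTrail (d :: rest') :=
              pvTrail_cons_of_any _ _ (by simp) hany
            rw [hw] at ihr
            have hint : List.intercalate ['_'] ([c] :: w :: W) = c :: '_' :: List.intercalate ['_'] (w :: W) := by
              simp [List.intercalate, List.intersperse]
            rw [htr, hint, ihr]
            simp [pvLead, hc]
    · -- bad head
      rw [pvF, if_neg hc]
      rw [pvF_true]
      have hdlen : (rest.dropWhile (fun c => !pvAsciiAlnum c)).length ≤ rest.length :=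
        List.length_dropWhile_le _ _
      have ihd := ih (rest.dropWhile (fun c => !pvAsciiAlnum c)).length (by simp; omega) _ rfl
      rw [ihd, pvLead_dropBad]
      have hwc : pvWords (c :: rest) = pvWords rest := by rw [pvWords, if_neg hc]
      have hlead : pvLead (c :: rest) = ['_'] := by simp [pvLead, hc]
      rw [hwc, hlead, ← pvWords_dropBad rest]
      cases hde : rest.dropWhile (fun c => !pvAsciiAlnum c) with
      | nil =>
        have hallbad : ∀ x ∈ rest, ¬((fun c => !pvAsciiAlnum c) x = false) := by
          intro x hx hgx
          have := List.dropWhile_eq_nil_iff.1 hde x hx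
          simp at this hgx
          exact absurd hgx (by simp [this])
        have hanyc : (c :: rest).any pvAsciiAlnum = false := by
          simp only [List.any_eq_false]
          intro x hx
          rcases List.mem_cons.1 hx with rfl | hx
          · simpa using hc
          · have := List.dropWhile_eq_nil_iff.1 hde x hx
            simpa using this
        have htrc : pvTrail (c :: rest) = [] := by
          unfold pvTrail
          rw [hanyc]
          cases hm : (c :: rest).getLast? <;> simp [pvTrailAux]
        rw [htrc]
        simp [pvWords, pvTrail, pvTrailAux, List.intercalate]
      | cons e d' =>
        have hsuf : (e :: d') <:+ rest := hde ▸ List.dropWhile_suffix _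
        have hrne : rest ≠ [] := by
          rintro rfl; simp at hde
        have hlastr : rest.getLast? = (e :: d').getLast? := by
          obtain ⟨t, ht⟩ := hsuf
          rw [← ht, List.getLast?_append_of_ne_nil t (by simp)]
        have hgoode : pvAsciiAlnum e = true :=
          pvDropWhile_head_good rest e d' hde
        have hanyd : (e :: d').any pvAsciiAlnum = true := by
          rw [List.any_cons, hgoode]; simp
        have hanyr : rest.any pvAsciiAlnum = true := by
          obtain ⟨t, ht⟩ := hsuf
          rw [← ht, List.any_append]
          simp [hanyd]
        have htr : pvTrail (c :: rest) = pvTrail (e :: d') := by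
          rw [pvTrail_cons_of_any _ _ hrne hanyr]
          unfold pvTrail
          rw [hlastr, hanyr, hanyd]
        rw [htr]
        simp

theorem pvGood_not_space (c : Char) (h : pvAsciiAlnum c = true) :
    PySem.Chars.isspace c = false := by
  have h128 : c.toNat < 128 := by
    unfold pvAsciiAlnum at h; simp at h; omega
  have H : ∀ n, n < 128 → pvAsciiAlnum (Char.ofNat n) = true → PySem.Chars.isspace (Char.ofNat n) = false := by decide
  have := H c.toNat h128
  rw [Char.ofNat_toNat] at this
  exact this h

theorem pvPop_concat (x : List Char) :
    pvPopTrailing (x ++ ['_']) = pvPopTrailing x := by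
  rw [pvPopTrailing, dif_pos (by simp), List.dropLast_concat]

theorem pvPop_self (x : List Char) (h : ∀ c, x.getLast? = some c → c ≠ '_') :
    pvPopTrailing x = x := by
  rw [pvPopTrailing, dif_neg (fun hm => h '_' hm rfl)]

theorem pvFoldl_ne (cs : List Char) (acc : List Char) (flag : Bool) (hacc : acc ≠ []) :
    (cs.foldl (fun (st : List Char × Bool) char =>
      if pvAsciiAlnum char then (st.1 ++ [char], false)
      else if !st.1.isEmpty && !st.2 then (st.1 ++ ['_'], true)
      else st) (acc, flag)).1 = acc ++ pvF flag cs := by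
  induction cs generalizing acc flag with
  | nil => simp [pvF]
  | cons c cs ih =>
    rw [List.foldl_cons]
    by_cases hc : pvAsciiAlnum c = true
    · simp only [hc, if_pos]
      rw [ih _ _ (by simp), pvF, if_pos hc]
      simp
    · have hne : acc.isEmpty = false := by
        cases acc with
        | nil => exact absurd rfl hacc
        | cons a l => rfl
      cases flag with
      | false =>
        have hst : (if pvAsciiAlnum c = true then (acc ++ [c], false)
            else if (!acc.isEmpty && !(false : Bool)) = true then (acc ++ ['_'], true)
            else (acc, false)) = (acc ++ ['_'], true) := by
          rw [if_neg (by simp [hc]), if_pos (by simp [hne])]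
        rw [hst, ih _ _ (by simp), pvF, if_neg (by simp [hc])]
        simp
      | true =>
        have hst : (if pvAsciiAlnum c = true then (acc ++ [c], false)
            else if (!acc.isEmpty && !(true : Bool)) = true then (acc ++ ['_'], true)
            else (acc, true)) = (acc, true) := by
          rw [if_neg (by simp [hc]), if_neg (by simp)]
        rw [hst, ih _ _ hacc, pvF, if_neg (by simp [hc])]
        simp

theorem pvFoldl_nil (cs : List Char) :
    (cs.foldl (fun (st : List Char × Bool) char =>
      if pvAsciiAlnum char then (st.1 ++ [char], false)
      else if !st.1.isEmpty && !st.2 then (st.1 ++ ['_'], true)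
      else st) ([], false)).1
    = pvF false (cs.dropWhile (fun c => !pvAsciiAlnum c)) := by
  induction cs with
  | nil => simp [pvF]
  | cons c cs ih =>
    rw [List.foldl_cons]
    by_cases hc : pvAsciiAlnum c = true
    · have hst : (if pvAsciiAlnum c = true then (([] : List Char) ++ [c], false)
          else if (!(List.isEmpty ([] : List Char)) && !(false : Bool)) = true then (([] : List Char) ++ ['_'], true)
          else (([] : List Char), false)) = ([c], false) := by
        rw [if_pos hc]; simp
      rw [hst, List.dropWhile_cons, if_neg (by simp [hc])]
      rw [pvFoldl_ne cs [c] false (by simp), pvF, if_pos hc]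
      simp
    · have hst : (if pvAsciiAlnum c = true then (([] : List Char) ++ [c], false)
          else if (!(List.isEmpty ([] : List Char)) && !(false : Bool)) = true then (([] : List Char) ++ ['_'], true)
          else (([] : List Char), false)) = ([], false) := by
        rw [if_neg (by simp [hc])]; simp
      rw [hst, List.dropWhile_cons, if_pos (by simp [hc])]
      exact ih

theorem pvGo_clean (cs : List Char) : ∀ (cur : List Char) (acc : List (List Char)),
    PySem.Chars.split₀.go (cs.map (fun c => if pvAsciiAlnum c then c else ' ')) cur acc
    = acc.reverse ++ pvWordsCont cs cur := by
  induction cs with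
  | nil =>
    intro cur acc
    cases hcur : cur.isEmpty <;>
      simp [PySem.Chars.split₀.go, pvWordsCont, hcur]
  | cons c cs ih =>
    intro cur acc
    rw [List.map_cons]
    by_cases hc : pvAsciiAlnum c = true
    · rw [if_pos hc]
      rw [PySem.Chars.split₀.go, if_neg (by simp [pvGood_not_space c hc])]
      rw [ih, pvWordsCont, if_pos hc]
    · rw [if_neg hc]
      rw [PySem.Chars.split₀.go, if_pos (by decide)]
      rw [pvWordsCont, if_neg hc]
      cases hcur : cur.isEmpty with
      | true => rw [if_pos rfl, ih]; simp [hcur]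
      | false => rw [if_neg (by simp [hcur]), ih]; simp [hcur]

theorem pvMem_words (cs : List Char) (w : List Char) (hw : w ∈ pvWords cs) :
    w ≠ [] ∧ ∀ c ∈ w, pvAsciiAlnum c = true := by
  induction cs using pvWords.induct with
  | case1 => simp [pvWords] at hw
  | case2 c rest hc ih =>
    rw [pvWords, if_pos hc] at hw
    rcases List.mem_cons.1 hw with h | h
    · subst h
      refine ⟨by simp, ?_⟩
      intro x hx
      rcases List.mem_cons.1 hx with rfl | hx
      · exact hc
      · exact List.mem_takeWhile_imp hx
    · exact ih h
  | case3 c rest hc ih =>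
    rw [pvWords, if_neg hc] at hw
    exact ih hw

theorem pvGood_ne_underscore (c : Char) (h : pvAsciiAlnum c = true) : c ≠ '_' := by
  rintro rfl; exact absurd h (by decide)

theorem pvWordsCont_spec (cs : List Char) : ∀ (cur : List Char),
    pvWordsCont cs cur
    = if cur.isEmpty then pvWords cs
      else (cur.reverse ++ cs.takeWhile pvAsciiAlnum) :: pvWords (cs.dropWhile pvAsciiAlnum) := by
  induction cs with
  | nil =>
    intro cur
    cases cur <;> simp [pvWordsCont, pvWords]
  | cons c cs ih =>
    intro cur
    by_cases hc : pvAsciiAlnum c = true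
    · rw [pvWordsCont, if_pos hc, ih (c :: cur)]
      rw [List.takeWhile_cons, if_pos hc, List.dropWhile_cons, if_neg (by simp [hc])]
      cases hcur : cur.isEmpty with
      | true =>
        have : cur = [] := by cases cur; rfl; simp at hcur
        subst this
        simp [pvWords, hc]
      | false => simp [hcur, hc]
    · rw [pvWordsCont, if_neg hc, ih []]
      have hw : pvWords (c :: cs) = pvWords cs := by rw [pvWords, if_neg hc]
      have ht : List.takeWhile pvAsciiAlnum (c :: cs) = [] := by
        rw [List.takeWhile_cons, if_neg hc]
      have hd : List.dropWhile pvAsciiAlnum (c :: cs) = c :: cs := by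
        rw [List.dropWhile_cons, if_neg hc]
      cases hcur : cur.isEmpty <;> simp [hw, ht, hd, hcur]

theorem pvIntercalate_ne_nil (ws : List (List Char)) (hne : ws ≠ [])
    (hw : ∀ w ∈ ws, w ≠ []) : List.intercalate ['_'] ws ≠ [] := by
  cases ws with
  | nil => exact absurd rfl hne
  | cons w ws =>
    cases ws with
    | nil =>
      have := hw w (by simp)
      simpa [List.intercalate] using this
    | cons w2 ws' =>
      have : List.intercalate ['_'] (w :: w2 :: ws') = w ++ '_' :: List.intercalate ['_'] (w2 :: ws') := by
        simp [List.intercalate, List.intersperse]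
      rw [this]
      simp

theorem pvGetLast_intercalate (ws : List (List Char))
    (hw : ∀ w ∈ ws, w ≠ [] ∧ ∀ c ∈ w, pvAsciiAlnum c = true) :
    ∀ c, (List.intercalate ['_'] ws).getLast? = some c → pvAsciiAlnum c = true := by
  induction ws with
  | nil => intro c h; simp [List.intercalate] at h
  | cons w ws ih =>
    intro c h
    cases ws with
    | nil =>
      rw [show List.intercalate ['_'] [w] = w from by simp [List.intercalate]] at h
      exact (hw w (by simp)).2 c (List.mem_of_getLast? h)
    | cons w2 ws' =>
      rw [show List.intercalate ['_'] (w :: w2 :: ws') = w ++ '_' :: List.intercalate ['_'] (w2 :: ws') from by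
        simp [List.intercalate, List.intersperse]] at h
      rw [List.getLast?_append_of_ne_nil w (by simp)] at h
      have hne' : List.intercalate ['_'] (w2 :: ws') ≠ [] :=
        pvIntercalate_ne_nil _ (by simp) (fun x hx => (hw x (by simp [hx])).1)
      obtain ⟨e, t, het⟩ := List.exists_cons_of_ne_nil hne'
      rw [show ('_' :: List.intercalate ['_'] (w2 :: ws')).getLast? = (List.intercalate ['_'] (w2 :: ws')).getLast? from by
        rw [het, List.getLast?_cons_cons]] at h
      exact ih (fun x hx => hw x (by simp [hx])) c h

theorem pvTrail_cases (cs : List Char) : pvTrail cs = [] ∨ pvTrail cs = ['_'] := by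
  unfold pvTrail
  cases cs.getLast? with
  | none => left; rfl
  | some c =>
    by_cases hb : (cs.any pvAsciiAlnum && !pvAsciiAlnum c) = true
    · right; simp [pvTrailAux, hb]
    · left; simp [pvTrailAux, hb]

theorem pvA_list (cs : List Char) :
    pvPopTrailing (pvF false (cs.dropWhile (fun c => !pvAsciiAlnum c)))
    = List.intercalate ['_'] (pvWords cs) := by
  rw [pvA2, pvLead_dropBad, pvWords_dropBad]
  have hI : ∀ c, (List.intercalate ['_'] (pvWords cs)).getLast? = some c → c ≠ '_' :=
    fun c h => pvGood_ne_underscore c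
      (pvGetLast_intercalate _ (fun w hw => pvMem_words cs w hw) c h)
  rcases pvTrail_cases (cs.dropWhile (fun c => !pvAsciiAlnum c)) with ht | ht <;> rw [ht]
  · rw [List.append_nil, List.nil_append]; exact pvPop_self _ hI
  · rw [List.nil_append, pvPop_concat]; exact pvPop_self _ hI

-- ===== VERDICT (by name: the statement is the Claim_ definition above) =====
theorem normalize_anchor_id_py_spec : Claim_equal_normalize_anchor_id_py := by
  intro value _
  unfold Spec_normalize_anchor_id_py
  simp only [normalize_anchor_id_py, normalize_anchor_id_py_alt]
  have hB : (PySem.Str.join "_" (PySem.Str.split₀ (String.ofList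
        ((PySem.Str.lower value).toList.map (fun c => if pvAsciiAlnum c then c else ' '))))).toList
      = List.intercalate ['_'] (pvWords ((PySem.Str.lower value).toList)) := by
    rw [PySem.Str.toList_join, PySem.Str.split₀_map_toList]
    simp only [String.toList_ofList]
    rw [show PySem.Chars.split₀ ((PySem.Str.lower value).toList.map
          (fun c => if pvAsciiAlnum c then c else ' '))
        = PySem.Chars.split₀.go ((PySem.Str.lower value).toList.map
          (fun c => if pvAsciiAlnum c then c else ' ')) [] [] from rfl]
    rw [pvGo_clean, pvWordsCont_spec]
    simp [PySem.Chars.join]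
  have key : String.ofList (pvPopTrailing
      (((PySem.Str.lower value).toList.foldl
        (fun (st : List Char × Bool) char =>
          if pvAsciiAlnum char then (st.1 ++ [char], false)
          else if !st.1.isEmpty && !st.2 then (st.1 ++ ['_'], true)
          else st) ([], false)).1))
      = PySem.Str.join "_" (PySem.Str.split₀ (String.ofList
        ((PySem.Str.lower value).toList.map (fun c => if pvAsciiAlnum c then c else ' ')))) := by
    rw [pvFoldl_nil, pvA_list, ← hB, String.ofList_toList]
  rw [key]
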